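-- pv_equiv track=rewrite | github.com/Ray0716/usaco-solutions | jan2023practice/completeSearch/whyDidTheCowCrossTheRoadII/circlecross.py | find_first_second_occurrences
-- ===== SOURCE A (Python) =====
-- def find_first_second_occurrences(lst, target_element):
--     first_index = None
--     second_index = None
--
--     for index, element in enumerate(lst):
--         if element == target_element:
--             if first_index is None:
--                 first_index = index
--             else:
--                 second_index = index
--                 break  # Break the loop after finding the second occurrence
--
--     return[first_index, second_index]
-- ===== SOURCE B (Python) =====
-- def find_first_second_occurrences(lst, target_element):
--     hits = [i for i, x in enumerate(lst) if x == target_element]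
--     return ((hits[:2] + [None, None])[:2])
-- ===== Notes on version B (the rewrite author's own statement) =====
-- stated objective: simpler
-- what changed: Replaces A's stateful early-exit scan (None sentinels, break) by two staged passes: a comprehension collecting all occurrence indices, then slicing/padding that list to exactly two Optional entries.
import Mathlib
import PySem

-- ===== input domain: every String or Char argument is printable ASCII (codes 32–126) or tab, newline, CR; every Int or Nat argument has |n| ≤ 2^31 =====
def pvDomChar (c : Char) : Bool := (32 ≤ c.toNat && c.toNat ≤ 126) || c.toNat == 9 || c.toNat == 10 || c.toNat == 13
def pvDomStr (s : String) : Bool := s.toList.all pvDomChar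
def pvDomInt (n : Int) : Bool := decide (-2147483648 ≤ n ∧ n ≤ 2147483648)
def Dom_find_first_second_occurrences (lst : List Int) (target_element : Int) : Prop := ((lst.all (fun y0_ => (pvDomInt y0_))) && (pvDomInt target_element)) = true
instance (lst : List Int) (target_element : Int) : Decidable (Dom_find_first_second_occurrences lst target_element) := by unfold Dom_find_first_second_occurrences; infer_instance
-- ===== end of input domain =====

-- B replaces A's stateful early-exit scan by two staged passes: collect all occurrence
-- indices with a comprehension, then pad/slice that list to two Optional entries (simpler).

-- ===== PORT A =====
-- the enumerate loop: index counter, first_index state; a second hit ends the loop (break)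
def pvGoA (t : Int) : List Int → Int → Option Int → List (Option Int)
  | [], _, first_index => [first_index, none]
  | x :: xs, index, first_index =>
    if x = t then
      match first_index with
      | none => pvGoA t xs (index + 1) (some index)
      | some f => [some f, some index]
    else pvGoA t xs (index + 1) first_index

def find_first_second_occurrences (lst : List Int) (target_element : Int) : List (Option Int) :=
  pvGoA target_element lst 0 none

-- ===== PORT B =====
-- hits = [i for i, x in enumerate(lst) if x == target_element]; hits[:2] is take 2
-- (slice with nonnegative literal bound), padded with two Nones and cut back to length 2
def find_first_second_occurrences_alt (lst : List Int) (target_element : Int) : List (Option Int) :=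
  let hits : List Int :=
    ((PySem.List.enumerate lst 0).filter (fun p => p.2 == target_element)).map (fun p => p.1)
  ((hits.take 2).map some ++ [none, none]).take 2

-- ===== PRECONDITION & SPEC =====
def Spec_find_first_second_occurrences (lst : List Int) (target_element : Int) (out : List (Option Int)) : Prop := out = find_first_second_occurrences_alt lst target_element
instance (lst : List Int) (target_element : Int) (out : List (Option Int)) : Decidable (Spec_find_first_second_occurrences lst target_element out) := by unfold Spec_find_first_second_occurrences; infer_instance

-- ===== CLAIM (what is proved, stated in full; the proofs are below) =====
def Claim_equal_find_first_second_occurrences : Prop := ∀ (lst : List Int) (target_element : Int), Dom_find_first_second_occurrences lst target_element → Spec_find_first_second_occurrences lst target_element (find_first_second_occurrences lst target_element)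

-- ===== LEMMAS AND PROOFS =====

-- first two entries of the hit list, padded to exactly two Option entries
def pvPad (hs : List Int) : List (Option Int) :=
  ((hs.take 2).map some ++ [none, none]).take 2

-- the occurrence indices of t in xs, numbering from i
def pvHits (t : Int) (xs : List Int) (i : Int) : List Int :=
  ((PySem.List.enumerate xs i).filter (fun p => p.2 == t)).map (fun p => p.1)

theorem pvHits_nil (t : Int) (i : Int) : pvHits t [] i = [] := by
  simp [pvHits, PySem.List.enumerate_nil]

theorem pvHits_cons (t x : Int) (xs : List Int) (i : Int) :
    pvHits t (x :: xs) i = (if x = t then [i] else []) ++ pvHits t xs (i + 1) := by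
  simp only [pvHits, PySem.List.enumerate_cons, List.filter_cons]
  by_cases hx : x = t <;> simp [hx]

-- after the first hit f, the loop yields f and then the next hit, i.e. pvPad (f :: hits)
theorem pvGoA_some (t : Int) (xs : List Int) (i f : Int) :
    pvGoA t xs i (some f) = pvPad (f :: pvHits t xs i) := by
  induction xs generalizing i with
  | nil => simp [pvGoA, pvHits_nil, pvPad]
  | cons x xs ih =>
    rw [pvHits_cons]
    by_cases hx : x = t
    · simp [pvGoA, hx, pvPad]
    · simp only [pvGoA, ih, if_neg hx, List.nil_append]

-- before any hit, the loop yields pvPad of the hit list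
theorem pvGoA_none (t : Int) (xs : List Int) (i : Int) :
    pvGoA t xs i none = pvPad (pvHits t xs i) := by
  induction xs generalizing i with
  | nil => simp [pvGoA, pvHits_nil, pvPad]
  | cons x xs ih =>
    rw [pvHits_cons]
    by_cases hx : x = t
    · simp only [pvGoA, pvGoA_some, if_pos hx, List.singleton_append]
    · simp only [pvGoA, ih, if_neg hx, List.nil_append]

-- ===== VERDICT (by name: the statement is the Claim_ definition above) =====
theorem find_first_second_occurrences_spec : Claim_equal_find_first_second_occurrences := by
  intro lst t _
  unfold Spec_find_first_second_occurrences
  unfold find_first_second_occurrences find_first_second_occurrences_alt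
  rw [pvGoA_none]
  rfl
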